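-- pv_equiv track=rewrite | github.com/elwlahd555/AUTO_UPLOAD_ALGORITHM | 프로그래머스/lv0/120911. 문자열 정렬하기 （2）/문자열 정렬하기 （2）.py | solution
-- ===== SOURCE A (Python) =====
-- def solution(my_string):
--     answer = ''
--     str_list=[]
--     for i in my_string:
--         str_list.append(i.lower())
--     str_list.sort()
--     for i in str_list:
--         answer += i
--     return answer
-- ===== SOURCE B (Python) =====
-- def solution(my_string):
--     counts = {}
--     for ch in my_string:
--         c = ch.lower()
--         counts[c] = counts.get(c, 0) + 1
--     out = ''
--     for i in range(128):
--         c = chr(i)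
--         out += c * counts.get(c, 0)
--     return out
-- ===== Notes on version B (the rewrite author's own statement) =====
-- stated objective: faster
-- what changed: Replaces A's append-then-comparison-sort of the lowercased characters with a single counting pass into a dict keyed by character followed by one sweep over the 128 ASCII codes emitting each character count times.
import Mathlib
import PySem

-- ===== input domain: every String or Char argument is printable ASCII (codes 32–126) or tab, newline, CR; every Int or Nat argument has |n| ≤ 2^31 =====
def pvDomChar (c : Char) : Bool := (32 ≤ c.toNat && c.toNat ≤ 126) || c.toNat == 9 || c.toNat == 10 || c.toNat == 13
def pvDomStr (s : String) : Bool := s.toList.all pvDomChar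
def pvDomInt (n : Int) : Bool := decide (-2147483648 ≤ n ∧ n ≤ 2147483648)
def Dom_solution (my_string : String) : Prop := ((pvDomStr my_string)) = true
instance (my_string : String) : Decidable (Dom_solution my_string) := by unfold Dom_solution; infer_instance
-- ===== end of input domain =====

-- B replaces A's comparison sort of the lowercased characters by a counting sort over the
-- fixed ASCII alphabet (O(n) vs O(n log n) in comparisons); exact same output on Dom.

-- ===== PORT A =====
def solution (my_string : String) : String :=
  -- str_list = []; for i in my_string: str_list.append(i.lower())
  let str_list := my_string.toList.foldl (fun acc i => acc ++ [PySem.Chars.lowerChar i]) []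
  -- str_list.sort()
  let str_list := PySem.List.sorted str_list (fun x => x) false
  -- answer = ''; for i in str_list: answer += i
  let answer := str_list.foldl (fun acc i => acc ++ [i]) []
  String.ofList answer

-- ===== PORT B =====
def solution_alt (my_string : String) : String :=
  -- counts = {}; for ch in my_string: c = ch.lower(); counts[c] = counts.get(c, 0) + 1
  let counts := my_string.toList.foldl
    (fun d ch => d.insert (PySem.Chars.lowerChar ch) (d.getD (PySem.Chars.lowerChar ch) 0 + 1))
    (PySem.Dict.empty : PySem.Dict Char Int)
  -- out = ''; for i in range(128): c = chr(i); out += c * counts.get(c, 0)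
  -- chr(i) is ported by hand as Char.ofNat i.toNat (exact for the codes 0..127 this loop visits)
  let out := (PySem.List.pyRange 0 128 1).foldl
    (fun acc i => acc ++ PySem.List.pyRepeat [Char.ofNat i.toNat] (counts.getD (Char.ofNat i.toNat) 0)) []
  String.ofList out

-- ===== PRECONDITION & SPEC =====
def Spec_solution (my_string : String) (out : String) : Prop := out = solution_alt my_string
instance (my_string : String) (out : String) : Decidable (Spec_solution my_string out) := by unfold Spec_solution; infer_instance

-- ===== CLAIM (what is proved, stated in full; the proofs are below) =====
def Claim_equal_solution : Prop := ∀ (my_string : String), Dom_solution my_string → Spec_solution my_string (solution my_string)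

-- ===== LEMMAS AND PROOFS =====

theorem toNat_ofNat_lt (i : Nat) (h : i < 128) : (Char.ofNat i).toNat = i := by
  have hv : Nat.isValidChar i := Or.inl (by omega)
  simp [Char.ofNat, hv, Char.toNat, Char.ofNatAux, UInt32.toNat_ofNatLT]

theorem lowerChar_lt (c : Char) (h : c.toNat < 128) : (PySem.Chars.lowerChar c).toNat < 128 := by
  unfold PySem.Chars.lowerChar PySem.Chars.isupper
  split_ifs with hu
  · have hz : c.toNat ≤ 90 := by
      rw [Bool.and_eq_true, decide_eq_true_eq, decide_eq_true_eq] at hu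
      have h2 : c ≤ 'Z' := hu.2
      have h3 : c.val.toNat ≤ ('Z').val.toNat := UInt32.le_iff_toNat_le.mp (Char.le_def.mp h2)
      simpa using h3
    rw [toNat_ofNat_lt (c.toNat + 32) (by omega)]
    omega
  · exact h

-- counting-sort output: the characters of the 128 buckets in code order
theorem count_buckets (ls : List Char) (n : Nat) (hn : n ≤ 128) (c : Char) :
    ((List.range n).flatMap (fun i => List.replicate (ls.count (Char.ofNat i)) (Char.ofNat i))).count c
      = if c.toNat < n then ls.count c else 0 := by
  induction n with
  | zero => simp
  | succ m ih =>
    rw [List.range_succ, List.flatMap_append, List.count_append, ih (by omega)]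
    have hm : List.flatMap (fun i => List.replicate (ls.count (Char.ofNat i)) (Char.ofNat i)) [m]
        = List.replicate (ls.count (Char.ofNat m)) (Char.ofNat m) := by simp
    rw [hm, List.count_replicate]
    by_cases hc : c = Char.ofNat m
    · subst hc
      rw [toNat_ofNat_lt m (by omega)]
      simp
    · have hne : c.toNat ≠ m := by
        intro he
        apply hc
        have := Char.ofNat_toNat c
        rw [← he, this]
      have hb : (Char.ofNat m == c) = false := beq_eq_false_iff_ne.mpr (fun he => hc he.symm)
      rw [hb, if_neg Bool.false_ne_true]
      by_cases h1 : c.toNat < m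
      · rw [if_pos h1, if_pos (show c.toNat < m + 1 by omega), Nat.add_zero]
      · rw [if_neg h1, if_neg (show ¬ c.toNat < m + 1 by omega), Nat.add_zero]

theorem pairwise_buckets (ls : List Char) (n : Nat) (hn : n ≤ 128) :
    ((List.range n).flatMap (fun i => List.replicate (ls.count (Char.ofNat i)) (Char.ofNat i))).Pairwise (· ≤ ·) := by
  induction n with
  | zero => simp
  | succ m ih =>
    rw [List.range_succ, List.flatMap_append]
    rw [List.pairwise_append]
    refine ⟨ih (by omega), ?_, ?_⟩
    · simp only [List.flatMap_cons, List.flatMap_nil, List.append_nil]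
      exact List.pairwise_replicate.mpr (Or.inr le_rfl)
    · intro a ha b hb
      simp only [List.mem_flatMap, List.mem_range, List.mem_replicate] at ha
      simp only [List.flatMap_cons, List.flatMap_nil, List.append_nil, List.mem_replicate] at hb
      obtain ⟨i, hi, -, rfl⟩ := ha
      obtain ⟨-, rfl⟩ := hb
      have h1 : (Char.ofNat i).toNat ≤ (Char.ofNat m).toNat := by
        rw [toNat_ofNat_lt i (by omega), toNat_ofNat_lt m (by omega)]; omega
      exact Char.le_def.mpr (UInt32.le_iff_toNat_le.mpr h1)

theorem sorted_eq_buckets (ls : List Char) (h : ∀ c ∈ ls, c.toNat < 128) :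
    PySem.List.sorted ls (fun x => x) false
      = (List.range 128).flatMap (fun i => List.replicate (ls.count (Char.ofNat i)) (Char.ofNat i)) := by
  have hperm : ls.Perm ((List.range 128).flatMap (fun i => List.replicate (ls.count (Char.ofNat i)) (Char.ofNat i))) := by
    rw [List.perm_iff_count]
    intro c
    rw [count_buckets ls 128 le_rfl c]
    by_cases hc : c.toNat < 128
    · rw [if_pos hc]
    · rw [if_neg hc]
      exact List.count_eq_zero.mpr (fun hm => hc (h c hm))
  exact PySem.List.eq_of_perm_of_pairwise_le_of_injective (fun x => x) (fun a b hab => hab)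
    ((PySem.List.sorted_perm ls (fun x => x) false).trans hperm)
    (PySem.List.sorted_pairwise ls (fun x => x))
    (pairwise_buckets ls 128 le_rfl)

-- ===== VERDICT (by name: the statement is the Claim_ definition above) =====
theorem solution_spec : Claim_equal_solution := by
  intro s hdom
  unfold Spec_solution solution solution_alt
  have hls : ∀ c ∈ s.toList.map PySem.Chars.lowerChar, c.toNat < 128 := by
    intro c hc
    rw [List.mem_map] at hc
    obtain ⟨ch, hch, rfl⟩ := hc
    have hd : pvDomChar ch = true := by
      have hall := hdom
      unfold Dom_solution pvDomStr at hall
      exact List.all_eq_true.mp hall ch hch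
    have hlt : ch.toNat < 128 := by
      simp [pvDomChar] at hd
      omega
    exact lowerChar_lt ch hlt
  dsimp only
  simp only [PySem.List.foldl_append_singleton_eq_map, List.nil_append, List.map_id']
  rw [sorted_eq_buckets _ hls]
  have hcnt : s.toList.foldl
      (fun d ch => d.insert (PySem.Chars.lowerChar ch) (d.getD (PySem.Chars.lowerChar ch) 0 + 1))
      (PySem.Dict.empty : PySem.Dict Char Int)
      = PySem.Dict.counter (s.toList.map PySem.Chars.lowerChar) := by
    rw [← PySem.Dict.foldl_insert_getD_add_one_eq_counter, List.foldl_map]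
  rw [hcnt]
  have hout : (PySem.List.pyRange 0 128 1).foldl
      (fun acc i => acc ++ PySem.List.pyRepeat [Char.ofNat i.toNat]
        ((PySem.Dict.counter (s.toList.map PySem.Chars.lowerChar)).getD (Char.ofNat i.toNat) 0)) []
      = (PySem.List.pyRange 0 128 1).flatMap
        (fun i => PySem.List.pyRepeat [Char.ofNat i.toNat]
          ((PySem.Dict.counter (s.toList.map PySem.Chars.lowerChar)).getD (Char.ofNat i.toNat) 0)) :=
    (PySem.List.foldl_append_eq_flatMap _ _ _).trans (List.nil_append _)
  rw [hout]
  rw [show ((128:Int)) = ((128:Nat):Int) by norm_num, PySem.List.pyRange_zero_natCast]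
  rw [List.flatMap_map]
  simp only [Int.toNat_natCast, PySem.Dict.getD_counter, PySem.List.pyRepeat_singleton]
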